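-- pv_equiv track=rewrite | github.com/BertRules/Global_reconstruction_of_language_models_with_linguistic_rules | rule/aspectrulemine.py | __get_term_pos_type_ops
-- ===== SOURCE A (Python) =====
-- def __get_term_pos_type_ops(term_pos_tags):
--     for t in term_pos_tags:
--         if t  == 'OP_A':
--             return 'OP_A'
--     for t in term_pos_tags:
--         if t == 'OP_O':
--             return 'OP_O'
--     return None
-- ===== SOURCE B (Python) =====
-- def __get_term_pos_type_ops(term_pos_tags):
--     saw_op_o = False
--     for t in term_pos_tags:
--         if t == 'OP_A':
--             return 'OP_A'
--         elif t == 'OP_O':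
--             saw_op_o = True
--     return 'OP_O' if saw_op_o else None
-- ===== Notes on version B (the rewrite author's own statement) =====
-- stated objective: simpler
-- what changed: Replaced A's two sequential scans with a single pass that returns 'OP_A' immediately and records whether 'OP_O' was seen.
import Mathlib
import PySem

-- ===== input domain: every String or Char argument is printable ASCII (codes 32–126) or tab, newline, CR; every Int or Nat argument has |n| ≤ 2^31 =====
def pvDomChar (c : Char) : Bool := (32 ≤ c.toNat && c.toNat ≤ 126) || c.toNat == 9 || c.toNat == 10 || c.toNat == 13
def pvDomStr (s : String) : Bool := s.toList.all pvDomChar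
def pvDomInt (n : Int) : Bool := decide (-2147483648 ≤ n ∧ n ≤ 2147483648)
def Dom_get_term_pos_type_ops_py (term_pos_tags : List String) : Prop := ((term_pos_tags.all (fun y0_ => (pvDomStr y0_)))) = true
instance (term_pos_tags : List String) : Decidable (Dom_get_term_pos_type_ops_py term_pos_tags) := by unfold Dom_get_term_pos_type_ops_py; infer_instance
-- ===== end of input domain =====

-- B replaces A's two sequential scans with one pass carrying a saw_op_o flag (objective: simpler).

-- ===== PORT A =====
-- first loop: return 'OP_A' on first match
def getTermPosLoopA (ts : List String) : Option String :=
  match ts with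
  | [] => none
  | t :: rest => if t = "OP_A" then some "OP_A" else getTermPosLoopA rest

-- second loop: return 'OP_O' on first match
def getTermPosLoopO (ts : List String) : Option String :=
  match ts with
  | [] => none
  | t :: rest => if t = "OP_O" then some "OP_O" else getTermPosLoopO rest

def get_term_pos_type_ops_py (term_pos_tags : List String) : Option String :=
  match getTermPosLoopA term_pos_tags with
  | some r => some r
  | none =>
    match getTermPosLoopO term_pos_tags with
    | some r => some r
    | none => none

-- ===== PORT B =====
-- one pass with a saw_op_o flag
def getTermPosOnePass (ts : List String) (saw_op_o : Bool) : Option String :=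
  match ts with
  | [] => if saw_op_o then some "OP_O" else none
  | t :: rest =>
    if t = "OP_A" then some "OP_A"
    else if t = "OP_O" then getTermPosOnePass rest true
    else getTermPosOnePass rest saw_op_o

def get_term_pos_type_ops_py_alt (term_pos_tags : List String) : Option String :=
  getTermPosOnePass term_pos_tags false

-- ===== PRECONDITION & SPEC =====
def Spec_get_term_pos_type_ops_py (term_pos_tags : List String) (out : Option String) : Prop := out = get_term_pos_type_ops_py_alt term_pos_tags
instance (term_pos_tags : List String) (out : Option String) : Decidable (Spec_get_term_pos_type_ops_py term_pos_tags out) := by unfold Spec_get_term_pos_type_ops_py; infer_instance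

-- ===== CLAIM (what is proved, stated in full; the proofs are below) =====
def Claim_equal_get_term_pos_type_ops_py : Prop := ∀ (term_pos_tags : List String), Dom_get_term_pos_type_ops_py term_pos_tags → Spec_get_term_pos_type_ops_py term_pos_tags (get_term_pos_type_ops_py term_pos_tags)

-- ===== LEMMAS AND PROOFS =====
-- Invariant: the one-pass scan with flag b equals: first-OP_A result, else OP_O if
-- the list contains OP_O or b was already set.
theorem onePass_eq (ts : List String) (b : Bool) :
    getTermPosOnePass ts b =
      match getTermPosLoopA ts with
      | some r => some r
      | none => if b || (getTermPosLoopO ts).isSome then some "OP_O" else none := by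
  induction ts generalizing b with
  | nil => cases b <;> simp [getTermPosOnePass, getTermPosLoopA, getTermPosLoopO]
  | cons t rest ih =>
    by_cases hA : t = "OP_A"
    · simp [getTermPosOnePass, getTermPosLoopA, hA]
    · by_cases hO : t = "OP_O"
      · simp [getTermPosOnePass, getTermPosLoopA, getTermPosLoopO, hO, ih]
      · simp [getTermPosOnePass, getTermPosLoopA, getTermPosLoopO, hA, hO, ih]

-- getTermPosLoopO only ever returns "OP_O"
theorem loopO_some (ts : List String) (r : String) (h : getTermPosLoopO ts = some r) : r = "OP_O" := by
  induction ts with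
  | nil => simp [getTermPosLoopO] at h
  | cons t rest ih =>
    by_cases ht : t = "OP_O"
    · rw [getTermPosLoopO] at h; simp [ht] at h; exact h.symm
    · rw [getTermPosLoopO] at h; simp [ht] at h; exact ih h

-- ===== VERDICT (by name: the statement is the Claim_ definition above) =====
theorem get_term_pos_type_ops_py_spec : Claim_equal_get_term_pos_type_ops_py := by
  intro ts _
  unfold Spec_get_term_pos_type_ops_py get_term_pos_type_ops_py get_term_pos_type_ops_py_alt
  rw [onePass_eq]
  cases hA : getTermPosLoopA ts <;> simp
  cases hO : getTermPosLoopO ts with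
  | none => simp
  | some r => simp [loopO_some ts r hO]
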